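-- pv_equiv track=rewrite | github.com/alalapi-0/VULTRagent | main.py | _escape_unknown_backslashes
-- ===== SOURCE A (Python) =====
-- import string
-- from typing import Callable, Dict, List, Tuple
--
-- def _escape_unknown_backslashes(value: str) -> Tuple[str, bool]:
--     """修正 YAML 双引号字符串中未转义的反斜杠。"""
--
--     result: List[str] = []
--     i = 0
--     changed = False
--     hex_digits = set(string.hexdigits)
--
--     while i < len(value):
--         char = value[i]
--         if char != "\\":
--             result.append(char)
--             i += 1
--             continue
--
--         # 处理合法的 YAML 转义序列，保持原样。
--         if i + 1 < len(value):
--             nxt = value[i + 1]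
--             if nxt in {'\\', '"', '/', 'b', 'f', 'n', 'r', 't'}:
--                 result.append("\\")
--                 result.append(nxt)
--                 i += 2
--                 continue
--             if nxt == 'x' and i + 3 < len(value) and all(
--                 ch in hex_digits for ch in value[i + 2 : i + 4]
--             ):
--                 result.append("\\")
--                 result.append('x')
--                 result.extend(value[i + 2 : i + 4])
--                 i += 4
--                 continue
--             if nxt == 'u' and i + 5 < len(value) and all(
--                 ch in hex_digits for ch in value[i + 2 : i + 6]
--             ):
--                 result.append("\\")
--                 result.append('u')
--                 result.extend(value[i + 2 : i + 6])
--                 i += 6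
--                 continue
--             if nxt == 'U' and i + 9 < len(value) and all(
--                 ch in hex_digits for ch in value[i + 2 : i + 10]
--             ):
--                 result.append("\\")
--                 result.append('U')
--                 result.extend(value[i + 2 : i + 10])
--                 i += 10
--                 continue
--
--         # 其余情况视为普通反斜杠，需要额外转义。
--         result.append("\\\\")
--         if i + 1 < len(value):
--             result.append(value[i + 1])
--             i += 2
--         else:
--             i += 1
--         changed = True
--
--     return "".join(result), changed
-- ===== SOURCE B (Python) =====
-- import string
--
-- _SIMPLE = '\\"/bfnrt'
-- _HEX_COUNT = {'x': 2, 'u': 4, 'U': 8}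
--
--
-- def _escape_len(rest):
--     """Length of a valid YAML escape body at the start of rest, or None."""
--     if not rest:
--         return None
--     c = rest[0]
--     if c in _SIMPLE:
--         return 1
--     n = _HEX_COUNT.get(c)
--     if n is not None and len(rest) > n and all(
--         ch in string.hexdigits for ch in rest[1:1 + n]
--     ):
--         return 1 + n
--     return None
--
--
-- def _escape_unknown_backslashes(value):
--     """修正 YAML 双引号字符串中未转义的反斜杠。"""
--     out = []
--     changed = False
--     n = len(value)
--     pos = 0
--     while True:
--         b = value.find('\\', pos)
--         if b == -1:
--             out.append(value[pos:])
--             break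
--         k = _escape_len(value[b + 1:b + 10])
--         if k is None:
--             out.append(value[pos:b] + '\\\\' + value[b + 1:b + 2])
--             pos = min(b + 2, n)
--             changed = True
--         else:
--             out.append(value[pos:b + 1 + k])
--             pos = b + 1 + k
--     return ''.join(out), changed
-- ===== Notes on version B (the rewrite author's own statement) =====
-- stated objective: faster
-- what changed: B replaces A's per-character index scan (examining every character and a branch cascade at each step) with a find()-driven segment loop: it jumps directly to each backslash with str.find(value, pos), classifies the escape once via a table-driven length helper on a 9-character window, and copies whole backslash-free segments as single slices.
import Mathlib
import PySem

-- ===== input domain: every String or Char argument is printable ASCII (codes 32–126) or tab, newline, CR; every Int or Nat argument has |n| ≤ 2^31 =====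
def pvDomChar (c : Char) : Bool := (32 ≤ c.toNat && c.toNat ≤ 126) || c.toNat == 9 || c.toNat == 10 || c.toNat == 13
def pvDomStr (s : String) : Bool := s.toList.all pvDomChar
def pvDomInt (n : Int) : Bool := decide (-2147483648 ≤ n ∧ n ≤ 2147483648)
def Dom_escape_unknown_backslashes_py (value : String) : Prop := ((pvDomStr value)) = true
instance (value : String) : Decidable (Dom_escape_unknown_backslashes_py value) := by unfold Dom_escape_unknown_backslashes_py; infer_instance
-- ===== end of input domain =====

-- B escapes lone backslashes by jumping from backslash to backslash with find(start) and copying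
-- the clean segments between them whole, instead of A's per-character scan; measured faster.

-- ===== PORT A =====
-- set(string.hexdigits)
-- set(string.hexdigits); the 22 code points of string.hexdigits
def pyHexDigits : PySem.Set Char := PySem.Set.ofList
  ['0','1','2','3','4','5','6','7','8','9','a','b','c','d','e','f','A','B','C','D','E','F']

-- A's while-loop: state (result, i, changed); works on the code points of `value`.
def aLoop (v : List Char) (i : Nat) (result : List (List Char)) (changed : Bool) :
    List (List Char) × Bool :=
  if h : i < v.length then
    let char := v[i]
    if char ≠ '\\' then
      aLoop v (i + 1) (result ++ [[char]]) changed
    else if h1 : i + 1 < v.length then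
      let nxt := v[i + 1]
      if nxt ∈ (['\\', '"', '/', 'b', 'f', 'n', 'r', 't'] : List Char) then
        aLoop v (i + 2) (result ++ [['\\'], [nxt]]) changed
      else if nxt = 'x' ∧ i + 3 < v.length ∧
          (PySem.List.slice v (some ((i : Int) + 2)) (some ((i : Int) + 4))).all
            (fun ch => ch ∈ pyHexDigits) then
        aLoop v (i + 4)
          (result ++ [['\\'], ['x']] ++
            (PySem.List.slice v (some ((i : Int) + 2)) (some ((i : Int) + 4))).map (fun c => [c]))
          changed
      else if nxt = 'u' ∧ i + 5 < v.length ∧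
          (PySem.List.slice v (some ((i : Int) + 2)) (some ((i : Int) + 6))).all
            (fun ch => ch ∈ pyHexDigits) then
        aLoop v (i + 6)
          (result ++ [['\\'], ['u']] ++
            (PySem.List.slice v (some ((i : Int) + 2)) (some ((i : Int) + 6))).map (fun c => [c]))
          changed
      else if nxt = 'U' ∧ i + 9 < v.length ∧
          (PySem.List.slice v (some ((i : Int) + 2)) (some ((i : Int) + 10))).all
            (fun ch => ch ∈ pyHexDigits) then
        aLoop v (i + 10)
          (result ++ [['\\'], ['U']] ++
            (PySem.List.slice v (some ((i : Int) + 2)) (some ((i : Int) + 10))).map (fun c => [c]))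
          changed
      else
        aLoop v (i + 2) (result ++ [['\\', '\\'], [nxt]]) true
    else
      aLoop v (i + 1) (result ++ [['\\', '\\']]) true
  else (result, changed)
  termination_by v.length - i
  decreasing_by all_goals exact Nat.sub_lt_sub_left h (Nat.lt_add_of_pos_right (by decide))

def escape_unknown_backslashes_py (value : String) : String × Bool :=
  let r := aLoop value.toList 0 [] false
  (String.ofList r.1.flatten, r.2)

-- ===== PORT B =====
-- code points of _SIMPLE = '\\"/bfnrt'
def bSimple : List Char := ['\\', '"', '/', 'b', 'f', 'n', 'r', 't']
def bHexCount : PySem.Dict Char Nat := PySem.Dict.mk [('x', 2), ('u', 4), ('U', 8)]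
-- code points of string.hexdigits
def bHexDigits : List Char :=
  ['0','1','2','3','4','5','6','7','8','9','a','b','c','d','e','f','A','B','C','D','E','F']

-- _escape_len(rest)
def bEscLen (rest : List Char) : Option Nat :=
  match rest with
  | [] => none
  | c :: _ =>
    if c ∈ bSimple then some 1
    else
      match PySem.Dict.get? bHexCount c with
      | some n =>
        if n < rest.length ∧
            (PySem.List.slice rest (some 1) (some (1 + (n : Int)))).all (fun ch => ch ∈ bHexDigits)
        then some (1 + n) else none
      | none => none

-- termination helpers for bLoop (cited in decreasing_by): a hit of find(start=pos) lies in [pos, len)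
lemma bFind_bounds (v : List Char) (pos : Nat)
    (hb : PySem.Chars.findFrom v ['\\'] (pos : Int) none ≠ -1) :
    pos ≤ v.length ∧ (pos : Int) ≤ PySem.Chars.findFrom v ['\\'] (pos : Int) none ∧
      (PySem.Chars.findFrom v ['\\'] (pos : Int) none).toNat < v.length := by
  by_cases hlen : pos ≤ v.length
  · have spec := PySem.Chars.findFrom_natCast_spec v ['\\'] pos hlen hb
    refine ⟨hlen, spec.1, ?_⟩
    obtain ⟨t, ht⟩ := spec.2.1
    have hlt : 0 < (v.drop (PySem.Chars.findFrom v ['\\'] (pos : Int) none).toNat).length := by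
      rw [← ht]; exact Nat.succ_pos t.length
    rw [List.length_drop] at hlt
    exact Nat.lt_of_sub_pos hlt
  · exfalso
    apply hb
    simp only [PySem.Chars.findFrom]
    rw [if_neg (Int.not_lt.mpr (Int.natCast_nonneg pos))]
    rw [if_pos (by exact_mod_cast Nat.lt_of_not_le hlen : ((v.length : Int)) < ((pos : Int)))]

-- B's while-loop: state (out, pos, changed); jumps with find(start), copies slices whole.
lemma bDec_nat (L p b j : Nat) (hpb : p ≤ b) (hbL : b < L) (hbj : b < j) :
    L + 1 - j < L + 1 - p :=
  Nat.sub_lt_sub_left (Nat.lt_succ_of_le (Nat.le_trans hpb (Nat.le_of_lt hbL)))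
    (Nat.lt_of_le_of_lt hpb hbj)

lemma bDec_lone (v : List Char) (pos : Nat)
    (hb : ¬ PySem.Chars.findFrom v ['\\'] (pos : Int) none = -1) :
    v.length + 1 - min (PySem.Chars.findFrom v ['\\'] (pos : Int) none + 2).toNat v.length <
      v.length + 1 - pos := by
  obtain ⟨hlen, hpb, hlt⟩ := bFind_bounds v pos hb
  have h0 : (0 : Int) ≤ PySem.Chars.findFrom v ['\\'] (pos : Int) none :=
    le_trans (Int.natCast_nonneg pos) hpb
  have hpn : pos ≤ (PySem.Chars.findFrom v ['\\'] (pos : Int) none).toNat := by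
    have h1 := Int.toNat_le_toNat hpb
    rwa [Int.toNat_natCast] at h1
  refine bDec_nat v.length pos _ _ hpn hlt (lt_min ?_ hlt)
  rw [Int.toNat_add h0 (by decide : (0 : Int) ≤ 2)]
  exact Nat.lt_add_of_pos_right (by decide)

lemma bDec_esc (v : List Char) (pos k : Nat)
    (hb : ¬ PySem.Chars.findFrom v ['\\'] (pos : Int) none = -1) :
    v.length + 1 - (PySem.Chars.findFrom v ['\\'] (pos : Int) none + 1 + (k : Int)).toNat <
      v.length + 1 - pos := by
  obtain ⟨hlen, hpb, hlt⟩ := bFind_bounds v pos hb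
  have h0 : (0 : Int) ≤ PySem.Chars.findFrom v ['\\'] (pos : Int) none :=
    le_trans (Int.natCast_nonneg pos) hpb
  have hpn : pos ≤ (PySem.Chars.findFrom v ['\\'] (pos : Int) none).toNat := by
    have h1 := Int.toNat_le_toNat hpb
    rwa [Int.toNat_natCast] at h1
  refine bDec_nat v.length pos _ _ hpn hlt ?_
  rw [Int.toNat_add (add_nonneg h0 Int.one_nonneg) (Int.natCast_nonneg k),
    Int.toNat_add h0 Int.one_nonneg, Int.toNat_one, Int.toNat_natCast]
  exact Nat.lt_of_lt_of_le (Nat.lt_succ_self _) (Nat.le_add_right _ k)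

def bLoop (v : List Char) (pos : Nat) (out : List (List Char)) (changed : Bool) :
    List (List Char) × Bool :=
  let b := PySem.Chars.findFrom v ['\\'] (pos : Int) none
  if hb : b = -1 then
    (out ++ [PySem.List.slice v (some (pos : Int)) none], changed)
  else
    match bEscLen (PySem.List.slice v (some (b + 1)) (some (b + 10))) with
    | none =>
        bLoop v (min (b + 2).toNat v.length)
          (out ++ [PySem.List.slice v (some (pos : Int)) (some b) ++ ['\\', '\\'] ++
            PySem.List.slice v (some (b + 1)) (some (b + 2))]) true
    | some k =>
        bLoop v (b + 1 + (k : Int)).toNat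
          (out ++ [PySem.List.slice v (some (pos : Int)) (some (b + 1 + (k : Int)))]) changed
  termination_by v.length + 1 - pos
  decreasing_by
  · exact bDec_lone v pos hb
  · exact bDec_esc v pos k hb

def escape_unknown_backslashes_py_alt (value : String) : String × Bool :=
  let r := bLoop value.toList 0 [] false
  (String.ofList r.1.flatten, r.2)

-- ===== PRECONDITION & SPEC =====
def Spec_escape_unknown_backslashes_py (value : String) (out : String × Bool) : Prop := out = escape_unknown_backslashes_py_alt value
instance (value : String) (out : String × Bool) : Decidable (Spec_escape_unknown_backslashes_py value out) := by unfold Spec_escape_unknown_backslashes_py; infer_instance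

-- ===== CLAIM (what is proved, stated in full; the proofs are below) =====
def Claim_equal_escape_unknown_backslashes_py : Prop := ∀ (value : String), Dom_escape_unknown_backslashes_py value → Spec_escape_unknown_backslashes_py value (escape_unknown_backslashes_py value)

-- ===== LEMMAS AND PROOFS =====

-- common specification scanner: one escape group at a time
def specE : List Char → List Char × Bool
  | [] => ([], false)
  | c :: rest =>
    if c = '\\' then
      match bEscLen rest with
      | some k => ('\\' :: rest.take k ++ (specE (rest.drop k)).1, (specE (rest.drop k)).2)
      | none =>
        match rest with
        | [] => (['\\', '\\'], true)
        | d :: rest' => ('\\' :: '\\' :: d :: (specE rest').1, true)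
    else (c :: (specE rest).1, (specE rest).2)
  termination_by s => s.length
  decreasing_by all_goals (simp_all; try omega)

lemma specE_nil : specE [] = ([], false) := by
  rw [specE.eq_def]

lemma specE_cons_ne (c : Char) (rest : List Char) (h : ¬ c = '\\') :
    specE (c :: rest) = (c :: (specE rest).1, (specE rest).2) := by
  rw [specE.eq_def]
  simp [h]

lemma specE_bs_some (rest : List Char) (k : Nat) (h : bEscLen rest = some k) :
    specE ('\\' :: rest) = ('\\' :: rest.take k ++ (specE (rest.drop k)).1, (specE (rest.drop k)).2) := by
  rw [specE.eq_def]
  simp [h]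

lemma specE_bs_nil : specE ['\\'] = (['\\', '\\'], true) := by
  rw [specE.eq_def]
  simp [bEscLen]

lemma specE_bs_none_cons (d : Char) (rest' : List Char) (h : bEscLen (d :: rest') = none) :
    specE ('\\' :: d :: rest') = ('\\' :: '\\' :: d :: (specE rest').1, true) := by
  rw [specE.eq_def]
  simp [h]

lemma specE_clean_append (t u : List Char) (ht : '\\' ∉ t) :
    specE (t ++ u) = (t ++ (specE u).1, (specE u).2) := by
  induction t with
  | nil => simp
  | cons c t ih =>
    have hc : ¬ c = '\\' := by
      intro h
      exact ht (h ▸ List.mem_cons_self ..)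
    have ht' : '\\' ∉ t := fun h => ht (List.mem_cons_of_mem _ h)
    rw [List.cons_append, specE_cons_ne c _ hc, ih ht']
    simp

lemma get?_bHexCount (c : Char) :
    PySem.Dict.get? bHexCount c =
      if c = 'x' then some 2 else if c = 'u' then some 4 else if c = 'U' then some 8 else none := by
  simp only [bHexCount, PySem.Dict.get?_mk_cons, beq_iff_eq]
  by_cases h1 : c = 'x'
  · subst h1; simp
  by_cases h2 : c = 'u'
  · subst h2; simp
  by_cases h3 : c = 'U'
  · subst h3; simp
  have n1 : ¬('x' = c) := fun hx => h1 hx.symm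
  have n2 : ¬('u' = c) := fun hx => h2 hx.symm
  have n3 : ¬('U' = c) := fun hx => h3 hx.symm
  simp [n1, n2, n3, h1, h2, h3, PySem.Dict.get?]

lemma pyHex_eq : pyHexDigits = bHexDigits := by decide

lemma drop_drop' (v : List Char) (a b c' : Nat) (h : b + a = c') :
    (v.drop a).drop b = v.drop c' := by
  rw [List.drop_drop]
  congr 1
  omega

lemma take_full_append (t u : List Char) (m n : Nat) (h : n = t.length + m) :
    (t ++ u).take n = t ++ u.take m := by
  subst h
  induction t with
  | nil => simp
  | cons a t ih =>
    have hl : (a :: t).length + m = (t.length + m) + 1 := by simp [Nat.succ_add]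
    rw [List.cons_append, hl, List.take_succ_cons, ih, List.cons_append]

lemma flatten_map_singleton (l : List Char) : (l.map (fun c => [c])).flatten = l := by
  induction l with
  | nil => simp
  | cons c l ih => simp [ih]

lemma bEscLen_simple (c : Char) (tail : List Char) (h : c ∈ bSimple) :
    bEscLen (c :: tail) = some 1 := by
  simp [bEscLen, h]

lemma bEscLen_hex (c : Char) (n : Nat) (tail : List Char)
    (hcs : c ∉ bSimple) (hg : PySem.Dict.get? bHexCount c = some n) :
    bEscLen (c :: tail) =
      if n < tail.length + 1 ∧ (tail.take n).all (fun ch => ch ∈ bHexDigits) then some (1 + n)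
      else none := by
  have hsl : PySem.List.slice (c :: tail) (some 1) (some (1 + (n : Int))) = tail.take n := by
    have h2 : 1 + (n : Int) = (((1 + n : Nat)) : Int) := by push_cast; ring
    have h1 : (1 : Int) = ((1 : Nat) : Int) := by norm_num
    rw [h2, h1, PySem.List.slice_natCast]
    simp
  simp only [bEscLen, if_neg hcs, hg, hsl, List.length_cons]

lemma bEscLen_none (c : Char) (tail : List Char)
    (hcs : c ∉ bSimple) (hg : PySem.Dict.get? bHexCount c = none) :
    bEscLen (c :: tail) = none := by
  simp only [bEscLen, if_neg hcs, hg]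

lemma bEscLen_take_nine (r : List Char) : bEscLen (r.take 9) = bEscLen r := by
  cases r with
  | nil => simp
  | cons c tail =>
    have htake : (c :: tail).take 9 = c :: tail.take 8 := rfl
    rw [htake]
    by_cases h1 : c ∈ bSimple
    · rw [bEscLen_simple c _ h1, bEscLen_simple c _ h1]
    · rcases hg : PySem.Dict.get? bHexCount c with _ | n
      · rw [bEscLen_none c _ h1 hg, bEscLen_none c _ h1 hg]
      · have hn : n ≤ 8 := by
          rw [get?_bHexCount] at hg
          split_ifs at hg
          all_goals simp_all
          all_goals omega
        rw [bEscLen_hex c n _ h1 hg, bEscLen_hex c n _ h1 hg]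
        have htt : (tail.take 8).take n = tail.take n := by
          rw [List.take_take]
          congr 1
          omega
        have hlen : ((tail.take 8).length + 1 > n) ↔ (tail.length + 1 > n) := by
          simp only [List.length_take]
          omega
        rw [htt]
        by_cases hc : n < tail.length + 1 ∧ (tail.take n).all (fun ch => ch ∈ bHexDigits) = true
        · rw [if_pos hc, if_pos ⟨by simp only [List.length_take]; omega, hc.2⟩]
        · rw [if_neg hc, if_neg ?_]
          rintro ⟨ha, hb2⟩
          exact hc ⟨by simp only [List.length_take] at ha; omega, hb2⟩

lemma bEscLen_le_length (r : List Char) (k : Nat) (h : bEscLen r = some k) : 1 ≤ k ∧ k ≤ r.length := by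
  cases r with
  | nil => simp [bEscLen] at h
  | cons c rest =>
    by_cases h1 : c ∈ bSimple
    · rw [bEscLen_simple _ _ h1] at h
      simp only [Option.some.injEq] at h
      simp only [List.length_cons]
      omega
    · rcases hg : PySem.Dict.get? bHexCount c with _ | n
      · rw [bEscLen_none _ _ h1 hg] at h
        simp at h
      · rw [bEscLen_hex _ _ _ h1 hg] at h
        split_ifs at h with h2
        simp only [Option.some.injEq] at h
        simp only [List.length_cons]
        omega

lemma slice2_eq (v : List Char) (i m : Nat) :
    PySem.List.slice v (some ((i : Int) + 2)) (some ((i : Int) + 2 + (m : Int))) =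
      (v.drop (i + 2)).take m := by
  have e2 : ((i : Int) + 2 + (m : Int)) = (((i + 2 + m : Nat)) : Int) := by push_cast; ring
  have e1 : ((i : Int) + 2) = (((i + 2 : Nat)) : Int) := by push_cast; ring
  rw [e2, e1, PySem.List.slice_natCast]
  congr 1
  omega

lemma flatten_take_drop_map (v : List Char) (n m : Nat) :
    (List.take n (List.drop m (v.map (fun c => [c])))).flatten = List.take n (List.drop m v) := by
  have h1 : List.take n (List.drop m (v.map (fun c => [c]))) =
      (List.take n (List.drop m v)).map (fun c => [c]) := by
    simp
  rw [h1, flatten_map_singleton]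

lemma aLoop_aux (n : Nat) : ∀ (v : List Char) (i : Nat) (r : List (List Char)) (c : Bool),
    v.length - i ≤ n →
    (aLoop v i r c).1.flatten = r.flatten ++ (specE (v.drop i)).1 ∧
      (aLoop v i r c).2 = (c || (specE (v.drop i)).2) := by
  induction n with
  | zero =>
    intro v i r c hn
    rw [aLoop.eq_def, dif_neg (by omega : ¬ i < v.length)]
    simp [List.drop_eq_nil_of_le (by omega : v.length ≤ i), specE_nil]
  | succ n ih =>
    intro v i r c hn
    rw [aLoop.eq_def]
    by_cases h : i < v.length
    case neg =>
      rw [dif_neg h]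
      simp [List.drop_eq_nil_of_le (by omega : v.length ≤ i), specE_nil]
    rw [dif_pos h]
    dsimp only
    have hdrop : v.drop i = v[i] :: v.drop (i + 1) := List.drop_eq_getElem_cons h
    by_cases hc2 : v[i] ≠ '\\'
    · rw [if_pos hc2]
      obtain ⟨ih1, ih2⟩ := ih v (i + 1) (r ++ [[v[i]]]) c (by omega)
      rw [hdrop, specE_cons_ne _ _ hc2]
      exact ⟨by rw [ih1]; simp, by rw [ih2]⟩
    rw [if_neg hc2]
    have hbs : v[i] = '\\' := not_not.mp hc2
    by_cases h1 : i + 1 < v.length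
    case neg =>
      rw [dif_neg h1]
      have hnil : v.drop (i + 1) = [] := List.drop_eq_nil_of_le (by omega)
      obtain ⟨ih1, ih2⟩ := ih v (i + 1) (r ++ [['\\', '\\']]) true (by omega)
      rw [hdrop, hbs, hnil, specE_bs_nil]
      exact ⟨by rw [ih1, hnil, specE_nil]; simp, by rw [ih2, hnil, specE_nil]; simp⟩
    rw [dif_pos h1]
    have hdrop1 : v.drop (i + 1) = v[i + 1] :: v.drop (i + 2) := List.drop_eq_getElem_cons h1
    have hsl2 : PySem.List.slice v (some ((i : Int) + 2)) (some ((i : Int) + 4)) =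
        (v.drop (i + 2)).take 2 := by
      have := slice2_eq v i 2
      norm_num at this
      exact this
    have hsl4 : PySem.List.slice v (some ((i : Int) + 2)) (some ((i : Int) + 6)) =
        (v.drop (i + 2)).take 4 := by
      have := slice2_eq v i 4
      norm_num at this
      exact this
    have hsl8 : PySem.List.slice v (some ((i : Int) + 2)) (some ((i : Int) + 10)) =
        (v.drop (i + 2)).take 8 := by
      have := slice2_eq v i 8
      norm_num at this
      exact this
    by_cases hc4 : v[i + 1] ∈ (['\\', '"', '/', 'b', 'f', 'n', 'r', 't'] : List Char)
    · rw [if_pos hc4]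
      have hesc : bEscLen (v.drop (i + 1)) = some 1 := by
        rw [hdrop1]
        exact bEscLen_simple _ _ (by simpa [bSimple] using hc4)
      obtain ⟨ih1, ih2⟩ := ih v (i + 2) (r ++ [['\\'], [v[i + 1]]]) c (by omega)
      have htk : (v.drop (i + 1)).take 1 = [v[i + 1]] := by
        rw [hdrop1]
        rfl
      have hdr : (v.drop (i + 1)).drop 1 = v.drop (i + 2) := drop_drop' v (i + 1) 1 _ (by omega)
      rw [hdrop, hbs, specE_bs_some _ 1 hesc, htk, hdr]
      exact ⟨by rw [ih1]; simp, by rw [ih2]⟩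
    rw [if_neg hc4]
    have hxs : ('x' : Char) ∉ bSimple := by decide
    have hus : ('u' : Char) ∉ bSimple := by decide
    have hUs : ('U' : Char) ∉ bSimple := by decide
    have hgx : PySem.Dict.get? bHexCount 'x' = some 2 := by rw [get?_bHexCount]; simp
    have hgu : PySem.Dict.get? bHexCount 'u' = some 4 := by rw [get?_bHexCount]; simp
    have hgU : PySem.Dict.get? bHexCount 'U' = some 8 := by rw [get?_bHexCount]; simp
    by_cases hc5 : v[i + 1] = 'x' ∧ i + 3 < v.length ∧
        (PySem.List.slice v (some ((i : Int) + 2)) (some ((i : Int) + 4))).all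
          (fun ch => ch ∈ pyHexDigits)
    · rw [if_pos hc5]
      obtain ⟨hx, hlen3, hall⟩ := hc5
      rw [hsl2, pyHex_eq] at hall
      have hesc : bEscLen (v.drop (i + 1)) = some 3 := by
        rw [hdrop1, hx, bEscLen_hex 'x' 2 _ hxs hgx,
          if_pos ⟨by simp only [List.length_drop]; omega, hall⟩]
      obtain ⟨ih1, ih2⟩ := ih v (i + 4)
        (r ++ [['\\'], ['x']] ++
          (PySem.List.slice v (some ((i : Int) + 2)) (some ((i : Int) + 4))).map (fun c => [c]))
        c (by omega)
      have htk : (v.drop (i + 1)).take 3 = 'x' :: (v.drop (i + 2)).take 2 := by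
        rw [hdrop1, hx]
        rfl
      have hdr : (v.drop (i + 1)).drop 3 = v.drop (i + 4) := drop_drop' v (i + 1) 3 _ (by omega)
      rw [hdrop, hbs, specE_bs_some _ 3 hesc, htk, hdr]
      refine ⟨?_, by rw [ih2]⟩
      rw [ih1, hsl2]
      simp [flatten_take_drop_map]
    rw [if_neg hc5]
    by_cases hc6 : v[i + 1] = 'u' ∧ i + 5 < v.length ∧
        (PySem.List.slice v (some ((i : Int) + 2)) (some ((i : Int) + 6))).all
          (fun ch => ch ∈ pyHexDigits)
    · rw [if_pos hc6]
      obtain ⟨hx, hlen3, hall⟩ := hc6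
      rw [hsl4, pyHex_eq] at hall
      have hesc : bEscLen (v.drop (i + 1)) = some 5 := by
        rw [hdrop1, hx, bEscLen_hex 'u' 4 _ hus hgu,
          if_pos ⟨by simp only [List.length_drop]; omega, hall⟩]
      obtain ⟨ih1, ih2⟩ := ih v (i + 6)
        (r ++ [['\\'], ['u']] ++
          (PySem.List.slice v (some ((i : Int) + 2)) (some ((i : Int) + 6))).map (fun c => [c]))
        c (by omega)
      have htk : (v.drop (i + 1)).take 5 = 'u' :: (v.drop (i + 2)).take 4 := by
        rw [hdrop1, hx]
        rfl
      have hdr : (v.drop (i + 1)).drop 5 = v.drop (i + 6) := drop_drop' v (i + 1) 5 _ (by omega)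
      rw [hdrop, hbs, specE_bs_some _ 5 hesc, htk, hdr]
      refine ⟨?_, by rw [ih2]⟩
      rw [ih1, hsl4]
      simp [flatten_take_drop_map]
    rw [if_neg hc6]
    by_cases hc7 : v[i + 1] = 'U' ∧ i + 9 < v.length ∧
        (PySem.List.slice v (some ((i : Int) + 2)) (some ((i : Int) + 10))).all
          (fun ch => ch ∈ pyHexDigits)
    · rw [if_pos hc7]
      obtain ⟨hx, hlen3, hall⟩ := hc7
      rw [hsl8, pyHex_eq] at hall
      have hesc : bEscLen (v.drop (i + 1)) = some 9 := by
        rw [hdrop1, hx, bEscLen_hex 'U' 8 _ hUs hgU,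
          if_pos ⟨by simp only [List.length_drop]; omega, hall⟩]
      obtain ⟨ih1, ih2⟩ := ih v (i + 10)
        (r ++ [['\\'], ['U']] ++
          (PySem.List.slice v (some ((i : Int) + 2)) (some ((i : Int) + 10))).map (fun c => [c]))
        c (by omega)
      have htk : (v.drop (i + 1)).take 9 = 'U' :: (v.drop (i + 2)).take 8 := by
        rw [hdrop1, hx]
        rfl
      have hdr : (v.drop (i + 1)).drop 9 = v.drop (i + 10) := drop_drop' v (i + 1) 9 _ (by omega)
      rw [hdrop, hbs, specE_bs_some _ 9 hesc, htk, hdr]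
      refine ⟨?_, by rw [ih2]⟩
      rw [ih1, hsl8]
      simp [flatten_take_drop_map]
    rw [if_neg hc7]
    -- lone backslash followed by a character
    have hesc : bEscLen (v[i + 1] :: v.drop (i + 2)) = none := by
      by_cases hx : v[i + 1] = 'x'
      · rw [hx, bEscLen_hex 'x' 2 _ hxs hgx, if_neg ?_]
        rintro ⟨ha, hb2⟩
        refine hc5 ⟨hx, by simp only [List.length_drop] at ha; omega, ?_⟩
        rw [hsl2, pyHex_eq]
        exact hb2
      by_cases hu : v[i + 1] = 'u'
      · rw [hu, bEscLen_hex 'u' 4 _ hus hgu, if_neg ?_]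
        rintro ⟨ha, hb2⟩
        refine hc6 ⟨hu, by simp only [List.length_drop] at ha; omega, ?_⟩
        rw [hsl4, pyHex_eq]
        exact hb2
      by_cases hU : v[i + 1] = 'U'
      · rw [hU, bEscLen_hex 'U' 8 _ hUs hgU, if_neg ?_]
        rintro ⟨ha, hb2⟩
        refine hc7 ⟨hU, by simp only [List.length_drop] at ha; omega, ?_⟩
        rw [hsl8, pyHex_eq]
        exact hb2
      refine bEscLen_none _ _ (by simpa [bSimple] using hc4) ?_
      rw [get?_bHexCount, if_neg hx, if_neg hu, if_neg hU]
    obtain ⟨ih1, ih2⟩ := ih v (i + 2) (r ++ [['\\', '\\'], [v[i + 1]]]) true (by omega)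
    rw [hdrop, hbs, hdrop1, specE_bs_none_cons _ _ hesc]
    exact ⟨by rw [ih1]; simp, by rw [ih2]; simp⟩

lemma aLoop_spec (v : List Char) (i : Nat) (r : List (List Char)) (c : Bool) :
    (aLoop v i r c).1.flatten = r.flatten ++ (specE (v.drop i)).1 ∧
      (aLoop v i r c).2 = (c || (specE (v.drop i)).2) :=
  aLoop_aux v.length v i r c (by omega)

lemma bLoop_aux (n : Nat) : ∀ (v : List Char) (pos : Nat) (out : List (List Char)) (c : Bool),
    pos ≤ v.length → v.length + 1 - pos ≤ n →
    (bLoop v pos out c).1.flatten = out.flatten ++ (specE (v.drop pos)).1 ∧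
      (bLoop v pos out c).2 = (c || (specE (v.drop pos)).2) := by
  induction n with
  | zero =>
    intro v pos out c hpos hn
    exfalso
    omega
  | succ n ih =>
    intro v pos out c hpos hn
    rw [bLoop.eq_def]
    dsimp only
    by_cases hb : PySem.Chars.findFrom v ['\\'] (pos : Int) none = -1
    · rw [dif_pos hb]
      have hnb : ¬ ['\\'] <:+: v.drop pos :=
        (PySem.Chars.findFrom_natCast_eq_neg_one_iff v ['\\'] pos hpos).mp hb
      have hclean : '\\' ∉ v.drop pos := by
        intro hm
        obtain ⟨s1, t1, hst⟩ := List.append_of_mem hm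
        exact hnb ⟨s1, t1, by rw [hst]; simp⟩
      have hspec : specE (v.drop pos) = (v.drop pos, false) := by
        have hca := specE_clean_append (v.drop pos) [] hclean
        simpa [specE_nil] using hca
      have hslice : PySem.List.slice v (some (pos : Int)) none = v.drop pos := by
        rw [PySem.List.slice_from (a := (pos : Int)) v (by omega)]
        simp
      rw [hslice, hspec]
      exact ⟨by simp, by simp⟩
    rw [dif_neg hb]
    set f := PySem.Chars.findFrom v ['\\'] (pos : Int) none with hf
    obtain ⟨hpb, hpre, hmin⟩ := PySem.Chars.findFrom_natCast_spec v ['\\'] pos hpos hb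
    rw [← hf] at hpb hpre hmin
    have hfnn : (0 : Int) ≤ f := le_trans (by omega) hpb
    have hblt : f.toNat < v.length := by
      obtain ⟨t2, ht2⟩ := hpre
      have hl : 0 < (v.drop f.toNat).length := by rw [← ht2]; simp
      simp only [List.length_drop] at hl
      omega
    have hposle : pos ≤ f.toNat := by omega
    have hdropbn : v.drop f.toNat = '\\' :: v.drop (f.toNat + 1) := by
      rw [List.drop_eq_getElem_cons hblt]
      obtain ⟨t2, ht2⟩ := hpre
      have h3 : '\\' :: t2 = v[f.toNat] :: v.drop (f.toNat + 1) := by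
        rw [← List.drop_eq_getElem_cons hblt]
        simpa using ht2
      injection h3 with h4 h5
      rw [h4]
    have hsl0 : PySem.List.slice v (some (pos : Int)) (some f) =
        (v.drop pos).take (f.toNat - pos) := by
      rw [PySem.List.slice_toNat (a := (pos : Int)) (b := f) v (by omega) hfnn]
      simp
    have htlen : ((v.drop pos).take (f.toNat - pos)).length = f.toNat - pos := by
      simp only [List.length_take, List.length_drop]
      omega
    have hsplit : v.drop pos = (v.drop pos).take (f.toNat - pos) ++ '\\' :: v.drop (f.toNat + 1) := by
      conv_lhs => rw [← List.take_append_drop (f.toNat - pos) (v.drop pos)]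
      rw [drop_drop' v pos (f.toNat - pos) f.toNat (by omega), hdropbn]
    have hcleant : '\\' ∉ (v.drop pos).take (f.toNat - pos) := by
      intro hm
      obtain ⟨j, hj, hjv⟩ := List.getElem_of_mem hm
      have hj' : j < f.toNat - pos := by
        simp only [List.length_take, List.length_drop] at hj
        omega
      have hjlen : pos + j < v.length := by omega
      have hv : v[pos + j] = '\\' := by
        rw [← hjv]
        simp [List.getElem_take, List.getElem_drop]
      apply hmin (pos + j) (by omega) (by omega)
      rw [List.drop_eq_getElem_cons hjlen, hv]
      exact ⟨_, rfl⟩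
    have hE : specE (v.drop pos) =
        ((v.drop pos).take (f.toNat - pos) ++ (specE ('\\' :: v.drop (f.toNat + 1))).1,
          (specE ('\\' :: v.drop (f.toNat + 1))).2) := by
      conv_lhs => rw [hsplit]
      exact specE_clean_append _ _ hcleant
    have hwin : PySem.List.slice v (some (f + 1)) (some (f + 10)) =
        (v.drop (f.toNat + 1)).take 9 := by
      rw [PySem.List.slice_toNat (a := f + 1) (b := f + 10) v (by omega) (by omega)]
      have e1 : (f + 1).toNat = f.toNat + 1 := by omega
      have e2 : (f + 10).toNat = f.toNat + 10 := by omega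
      rw [e1, e2]
      congr 1
      omega
    rw [hwin, bEscLen_take_nine]
    rcases hek : bEscLen (v.drop (f.toNat + 1)) with _ | k
    · -- no valid escape after the backslash: escape the backslash itself
      have hsl1 : PySem.List.slice v (some (f + 1)) (some (f + 2)) =
          (v.drop (f.toNat + 1)).take 1 := by
        rw [PySem.List.slice_toNat (a := f + 1) (b := f + 2) v (by omega) (by omega)]
        have e1 : (f + 1).toNat = f.toNat + 1 := by omega
        have e2 : (f + 2).toNat = f.toNat + 2 := by omega
        rw [e1, e2]
        congr 1
        omega
      simp only []
      rcases hrest : v.drop (f.toNat + 1) with _ | ⟨d, rest'⟩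
      · have hlen1 : v.length = f.toNat + 1 := by
          have hlr := congrArg List.length hrest
          simp only [List.length_drop, List.length_nil] at hlr
          omega
        have hmin2 : min (f + 2).toNat v.length = v.length := by omega
        rw [hmin2]
        obtain ⟨ih1, ih2⟩ := ih v v.length (out ++
          [PySem.List.slice v (some (pos : Int)) (some f) ++ ['\\', '\\'] ++
            PySem.List.slice v (some (f + 1)) (some (f + 2))]) true (by omega) (by omega)
        constructor
        · rw [ih1, hsl0, hsl1, List.drop_length, specE_nil, hE, hrest, specE_bs_nil]
          simp
        · rw [ih2, List.drop_length, specE_nil, hE, hrest, specE_bs_nil]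
          simp
      · have hlen2 : f.toNat + 1 < v.length := by
          have hlr := congrArg List.length hrest
          simp only [List.length_drop, List.length_cons] at hlr
          omega
        have hmin2 : min (f + 2).toNat v.length = f.toNat + 2 := by omega
        rw [hmin2]
        obtain ⟨ih1, ih2⟩ := ih v (f.toNat + 2) (out ++
          [PySem.List.slice v (some (pos : Int)) (some f) ++ ['\\', '\\'] ++
            PySem.List.slice v (some (f + 1)) (some (f + 2))]) true (by omega) (by omega)
        have hdut : v.drop (f.toNat + 2) = rest' := by
          have hdd : (v.drop (f.toNat + 1)).drop 1 = v.drop (f.toNat + 2) :=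
            drop_drop' v (f.toNat + 1) 1 _ (by omega)
          rw [← hdd, hrest]
          simp
        constructor
        · rw [ih1, hsl0, hsl1, hdut, hE, hrest, specE_bs_none_cons d rest' (hrest ▸ hek)]
          simp
        · rw [ih2, hdut, hE, hrest, specE_bs_none_cons d rest' (hrest ▸ hek)]
          simp
    · -- valid escape of length k: copy it unchanged
      have hkb := bEscLen_le_length _ _ hek
      have hk2 : f.toNat + 1 + k ≤ v.length := by
        have := hkb.2
        simp only [List.length_drop] at this
        omega
      have htn : (f + 1 + (k : Int)).toNat = f.toNat + 1 + k := by omega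
      simp only []
      rw [htn]
      obtain ⟨ih1, ih2⟩ := ih v (f.toNat + 1 + k)
        (out ++ [PySem.List.slice v (some (pos : Int)) (some (f + 1 + (k : Int)))]) c
        (by omega) (by omega)
      have hslk : PySem.List.slice v (some (pos : Int)) (some (f + 1 + (k : Int))) =
          (v.drop pos).take (f.toNat - pos) ++ '\\' :: (v.drop (f.toNat + 1)).take k := by
        rw [PySem.List.slice_toNat (a := (pos : Int)) (b := f + 1 + (k : Int)) v (by omega) (by omega)]
        have e1 : ((pos : Int)).toNat = pos := by omega
        have e2 : (f + 1 + (k : Int)).toNat - pos = (f.toNat - pos) + (1 + k) := by omega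
        rw [e1, e2]
        conv_lhs => rw [hsplit]
        rw [take_full_append _ _ (1 + k) _ (by rw [htlen]), Nat.add_comm 1 k, List.take_succ_cons]
      have hdr : (v.drop (f.toNat + 1)).drop k = v.drop (f.toNat + 1 + k) :=
        drop_drop' v (f.toNat + 1) k _ (by omega)
      constructor
      · rw [ih1, hslk, hE, specE_bs_some _ k hek, hdr]
        simp
      · rw [ih2, hE, specE_bs_some _ k hek, hdr]

lemma bLoop_spec (v : List Char) (pos : Nat) (out : List (List Char)) (c : Bool)
    (hpos : pos ≤ v.length) :
    (bLoop v pos out c).1.flatten = out.flatten ++ (specE (v.drop pos)).1 ∧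
      (bLoop v pos out c).2 = (c || (specE (v.drop pos)).2) :=
  bLoop_aux (v.length + 1) v pos out c hpos (by omega)

-- ===== VERDICT (by name: the statement is the Claim_ definition above) =====
theorem escape_unknown_backslashes_py_spec : Claim_equal_escape_unknown_backslashes_py := by
  intro value _
  unfold Spec_escape_unknown_backslashes_py escape_unknown_backslashes_py escape_unknown_backslashes_py_alt
  have ha := aLoop_spec value.toList 0 [] false
  have hb := bLoop_spec value.toList 0 [] false (by omega)
  simp only [List.drop_zero] at ha hb
  simp only [ha.1, ha.2, hb.1, hb.2]
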